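-- pv_equiv track=rewrite | github.com/Enjef/Algo | 2000 - 2099/2089 - Find Target Indices After Sorting Array/2089 - Find Target Indices After Sorting Array.py | targetIndices_2nd_best_speed
-- ===== SOURCE A (Python) =====
-- from typing import List
--
-- def targetIndices_2nd_best_speed(
--         nums: List[int], target: int) -> List[int]:
--     l = e = 0
--     for n in nums:
--         if n < target:
--             l += 1
--         elif n == target:
--             e += 1
--     return [i for i in range(l, l + e)]
-- ===== SOURCE B (Python) =====
-- from typing import List
--
-- def targetIndices_2nd_best_speed(
--         nums: List[int], target: int) -> List[int]:
--     return [i for i, v in enumerate(sorted(nums)) if v == target]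
-- ===== Notes on version B (the rewrite author's own statement) =====
-- stated objective: idiomatic
-- what changed: B literally sorts a copy of the list and collects the indices where the sorted array equals the target, instead of A's count-of-less / count-of-equal pass that reconstructs the index range arithmetically.
import Mathlib
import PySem

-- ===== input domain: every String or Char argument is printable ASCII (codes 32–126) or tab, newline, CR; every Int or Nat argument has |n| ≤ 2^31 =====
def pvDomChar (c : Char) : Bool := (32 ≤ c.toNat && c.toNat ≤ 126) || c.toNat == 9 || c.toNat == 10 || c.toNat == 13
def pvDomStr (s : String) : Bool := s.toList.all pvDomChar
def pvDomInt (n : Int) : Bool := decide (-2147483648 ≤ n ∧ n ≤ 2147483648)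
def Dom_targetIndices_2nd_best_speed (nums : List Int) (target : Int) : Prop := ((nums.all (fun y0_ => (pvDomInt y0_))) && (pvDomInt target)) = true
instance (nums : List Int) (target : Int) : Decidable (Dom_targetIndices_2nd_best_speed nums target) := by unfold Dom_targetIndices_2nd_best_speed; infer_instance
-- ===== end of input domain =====

-- B re-implements the function idiomatically: sort a copy, then collect the indices where the
-- sorted list equals the target (A instead counts less-than / equal and emits a range).


-- ===== PORT A =====
-- l = e = 0; for n in nums: if n < target: l += 1 elif n == target: e += 1; return list(range(l, l+e))
def targetIndices_2nd_best_speed (nums : List Int) (target : Int) : List Int :=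
  let le := nums.foldl (fun (le : Int × Int) n =>
    if n < target then (le.1 + 1, le.2)
    else if n = target then (le.1, le.2 + 1)
    else le) (0, 0)
  PySem.List.pyRange le.1 (le.1 + le.2) 1

-- ===== PORT B =====
-- return [i for i, v in enumerate(sorted(nums)) if v == target]
def targetIndices_2nd_best_speed_alt (nums : List Int) (target : Int) : List Int :=
  (PySem.List.enumerate (PySem.List.sorted nums (fun x => x) false) 0).filterMap
    (fun p => if p.2 = target then some p.1 else none)

-- ===== PRECONDITION & SPEC =====
def Spec_targetIndices_2nd_best_speed (nums : List Int) (target : Int) (out : List Int) : Prop := out = targetIndices_2nd_best_speed_alt nums target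
instance (nums : List Int) (target : Int) (out : List Int) : Decidable (Spec_targetIndices_2nd_best_speed nums target out) := by unfold Spec_targetIndices_2nd_best_speed; infer_instance

-- ===== CLAIM (what is proved, stated in full; the proofs are below) =====
def Claim_equal_targetIndices_2nd_best_speed : Prop := ∀ (nums : List Int) (target : Int), Dom_targetIndices_2nd_best_speed nums target → Spec_targetIndices_2nd_best_speed nums target (targetIndices_2nd_best_speed nums target)

-- ===== LEMMAS AND PROOFS =====

-- A's fold computes (count of elements < target, count of elements = target).
theorem fold_counts (nums : List Int) (target : Int) (a b : Int) :
    nums.foldl (fun (le : Int × Int) n =>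
      if n < target then (le.1 + 1, le.2)
      else if n = target then (le.1, le.2 + 1)
      else le) (a, b)
    = (a + (nums.countP (fun n => decide (n < target)) : Int),
       b + (nums.countP (fun n => decide (n = target)) : Int)) := by
  induction nums generalizing a b with
  | nil => simp
  | cons x xs ih =>
    simp only [List.foldl_cons, List.countP_cons]
    by_cases h1 : x < target
    · have h2 : x ≠ target := ne_of_lt h1
      rw [if_pos h1, ih]
      simp [h1, h2] <;> omega
    · rw [if_neg h1]
      by_cases h2 : x = target
      · rw [if_pos h2, ih]
        simp [h1, h2] <;> omega
      · rw [if_neg h2, ih]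
        simp [h1, h2]

-- On a ≤-sorted list, the comprehension's indices (starting at k) form exactly the
-- contiguous range [k + #<, k + #< + #=).
theorem filterMap_enumerate_sorted (t : Int) (s : List Int)
    (hs : s.Pairwise (· ≤ ·)) (k : Int) :
    (PySem.List.enumerate s k).filterMap (fun p => if p.2 = t then some p.1 else none)
    = PySem.List.pyRange (k + (s.countP (fun n => decide (n < t)) : Int))
        (k + (s.countP (fun n => decide (n < t)) : Int) + (s.countP (fun n => decide (n = t)) : Int)) 1 := by
  induction s generalizing k with
  | nil => simp [PySem.List.enumerate_nil, PySem.List.pyRange_one_eq_nil]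
  | cons x xs ih =>
    rw [List.pairwise_cons] at hs
    obtain ⟨hall, htail⟩ := hs
    rw [PySem.List.enumerate_cons, List.filterMap_cons]
    simp only [List.countP_cons]
    by_cases h1 : x < t
    · have h2 : x ≠ t := ne_of_lt h1
      have d1 : decide (x < t) = true := decide_eq_true h1
      have d2 : decide (x = t) = false := decide_eq_false h2
      simp only [h2, if_false, ih htail, d1, d2, decide_true, decide_false, if_true, if_false, Bool.false_eq_true, Nat.cast_add, Nat.cast_one, Nat.cast_zero, add_zero, Nat.cast_ofNat, Nat.cast_ite]
      congr 1 <;> ring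
    · have d1 : decide (x < t) = false := decide_eq_false h1
      by_cases h2 : x = t
      · subst h2
        have hlt0 : xs.countP (fun n => decide (n < x)) = 0 := by
          rw [List.countP_eq_zero]
          intro y hy; simpa using not_lt.mpr (hall y hy)
        have d2 : decide (x = x) = true := decide_eq_true rfl
        simp only [if_pos rfl, ih htail, hlt0, d1, d2, decide_true, decide_false, if_true, if_false, Bool.false_eq_true, Nat.cast_add, Nat.cast_one, Nat.cast_zero, add_zero, Nat.cast_ofNat, Nat.cast_ite]
        conv_rhs => rw [PySem.List.pyRange_one_cons (by omega)]
        congr 2 <;> ring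
      · have hge : ∀ y ∈ xs, t < y := fun y hy =>
          lt_of_lt_of_le (lt_of_le_of_ne (not_lt.mp h1) (Ne.symm h2)) (hall y hy)
        have hlt0 : xs.countP (fun n => decide (n < t)) = 0 := by
          rw [List.countP_eq_zero]; intro y hy; simpa using not_lt.mpr (le_of_lt (hge y hy))
        have heq0 : xs.countP (fun n => decide (n = t)) = 0 := by
          rw [List.countP_eq_zero]; intro y hy; simpa using (ne_of_gt (hge y hy))
        have d2 : decide (x = t) = false := decide_eq_false h2
        simp only [h2, if_false, ih htail, hlt0, heq0, d1, d2, decide_true, decide_false, if_true, if_false, Bool.false_eq_true, Nat.cast_add, Nat.cast_one, Nat.cast_zero, add_zero, Nat.cast_ofNat, Nat.cast_ite]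
        rw [PySem.List.pyRange_one_eq_nil (by omega),
            PySem.List.pyRange_one_eq_nil (by omega)]

-- ===== VERDICT (by name: the statement is the Claim_ definition above) =====
theorem targetIndices_2nd_best_speed_spec : Claim_equal_targetIndices_2nd_best_speed := by
  intro nums target _
  unfold Spec_targetIndices_2nd_best_speed targetIndices_2nd_best_speed targetIndices_2nd_best_speed_alt
  rw [fold_counts,
      filterMap_enumerate_sorted target _ (PySem.List.sorted_pairwise nums (fun x => x)) 0,
      (PySem.List.sorted_perm nums (fun x => x) false).countP_eq,
      (PySem.List.sorted_perm nums (fun x => x) false).countP_eq]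
  simp
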